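-- pv_equiv track=rewrite | github.com/zhengmaoWorkspace/learning_test | study/number-split/number_split.py | process
-- ===== SOURCE A (Python) =====
-- def process(num):
--     dp = [1 for i in range(num + 1)]
--     for i in range(1, num + 1):
--         if i % 2 == 1:
--             dp[i] = dp[i - 1]
--         else:
--             dp[i] = dp[i - 1] + dp[i // 2]
--     return dp[-1]
-- ===== SOURCE B (Python) =====
-- def process(num):
--     # Every dp value equals the even-position value e[m] = dp[2*m] at m = j//2,
--     # and e[m] is one more than the sum of the first m positive-index dp values: build only the half-length
--     # sequence e, keeping that prefix sum in a running accumulator s.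
--     half = num // 2
--     e = [1]
--     s = 0
--     for m in range(1, half + 1):
--         s += e[m // 2]
--         e.append(1 + s)
--     return e[half]
-- ===== Notes on version B (the rewrite author's own statement) =====
-- stated objective: faster
-- what changed: B drops A's full dp array with backward half-index lookups and instead builds only the half-length subsequence of even-position dp values, maintained through a running prefix-sum accumulator, so the loop runs half as many times.
import Mathlib
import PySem

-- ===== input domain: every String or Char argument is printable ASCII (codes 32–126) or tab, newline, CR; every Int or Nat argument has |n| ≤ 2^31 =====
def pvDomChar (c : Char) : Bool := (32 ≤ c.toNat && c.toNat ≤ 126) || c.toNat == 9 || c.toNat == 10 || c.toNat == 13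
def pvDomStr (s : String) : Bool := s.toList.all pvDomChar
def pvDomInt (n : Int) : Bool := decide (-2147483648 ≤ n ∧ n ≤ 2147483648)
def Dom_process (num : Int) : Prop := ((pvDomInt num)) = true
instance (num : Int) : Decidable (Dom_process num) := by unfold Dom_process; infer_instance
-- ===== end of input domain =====

-- B computes the same value via the half-length subsequence of even-position dp values
-- and a running prefix sum, instead of A's full dp array with backward half-index
-- lookups; the loop runs half as many times (measured faster by a constant factor).
-- Python lists are ported as Array Int (arrGetD/arrSetD follow Python's negative-index rule).

-- Python xs[i] with default (exact Python index rule: negative i counts from the end).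
def arrGetD (a : Array Int) (i : Int) (d : Int) : Int :=
  let j := if i < 0 then i + a.size else i
  if 0 ≤ j then a.getD j.toNat d else d

-- Python xs[i] = v (total form; in the ports the index is always in range).
def arrSetD (a : Array Int) (i : Int) (v : Int) : Array Int :=
  let j := if i < 0 then i + a.size else i
  if 0 ≤ j then a.setIfInBounds j.toNat v else a

-- ===== PORT A =====
def processStep (dp : Array Int) (i : Int) : Array Int :=
  if PySem.Int.mod i 2 == 1 then
    arrSetD dp i (arrGetD dp (i - 1) 0)
  else
    arrSetD dp i (arrGetD dp (i - 1) 0 + arrGetD dp (PySem.Int.floordiv i 2) 0)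

def process (num : Int) : Int :=
  let dp0 := ((PySem.List.pyRange 0 (num + 1) 1).map (fun _ => (1 : Int))).toArray
  let dp := (PySem.List.pyRange 1 (num + 1) 1).foldl processStep dp0
  arrGetD dp (-1) 0

-- ===== PORT B =====
def processAltStep (p : Array Int × Int) (m : Int) : Array Int × Int :=
  let s := p.2 + arrGetD p.1 (PySem.Int.floordiv m 2) 0
  (p.1.push (1 + s), s)

def process_alt (num : Int) : Int :=
  let half := PySem.Int.floordiv num 2
  let es := (PySem.List.pyRange 1 (half + 1) 1).foldl processAltStep (#[1], 0)
  arrGetD es.1 half 0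

-- ===== PRECONDITION & SPEC =====
-- A raises IndexError (dp[-1] on the empty list) whenever num is negative; Pre_ excludes exactly those inputs.
def Pre_process (num : Int) : Prop := 0 ≤ num
instance (num : Int) : Decidable (Pre_process num) := by unfold Pre_process; infer_instance
def pvWitness_process : Int := 6

def Spec_process (num : Int) (out : Int) : Prop := out = process_alt num
instance (num : Int) (out : Int) : Decidable (Spec_process num out) := by unfold Spec_process; infer_instance

-- ===== CLAIM (what is proved, stated in full; the proofs are below) =====
def Claim_equal_process : Prop := ∀ (num : Int), Dom_process num → Pre_process num → Spec_process num (process num)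

-- ===== LEMMAS AND PROOFS =====

-- s m = sum of the first m positive-index dp values; s(m+1) = s m + e((m+1)/2) with e t = 1 + s t.
def sFun : Nat → Int
  | 0 => 0
  | (m + 1) => sFun m + (1 + sFun ((m + 1) / 2))
decreasing_by all_goals omega

def eFun (m : Nat) : Int := 1 + sFun m

def dFun (j : Nat) : Int := eFun (j / 2)

theorem dFun_zero : dFun 0 = 1 := by simp [dFun, eFun, sFun]

theorem dFun_odd (k : Nat) (h : (k + 1) % 2 = 1) : dFun (k + 1) = dFun k := by
  unfold dFun
  congr 1
  omega

theorem dFun_even (k : Nat) (h : (k + 1) % 2 = 0) :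
    dFun (k + 1) = dFun k + dFun ((k + 1) / 2) := by
  have ht1 : 1 ≤ (k + 1) / 2 := by omega
  set t := (k + 1) / 2 with htdef
  have h1 : (k + 1) / 2 = t := rfl
  have h2 : k / 2 = t - 1 := by omega
  have h3 : t = (t - 1) + 1 := by omega
  unfold dFun eFun
  rw [h1, h2]
  rw [h3, sFun]
  have h4 : (t - 1 + 1) / 2 = t / 2 := by omega
  rw [h4, ← h3]
  ring

theorem arr_getD_toList (a : Array Int) (n : Nat) (d : Int) :
    a.getD n d = a.toList.getD n d := by
  unfold Array.getD
  split
  · rename_i h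
    have h' : n < a.toList.length := by simpa using h
    rw [List.getD_eq_getElem a.toList d h']
    rfl
  · rename_i h
    rw [List.getD_eq_getElem?_getD]
    rw [show a.toList[n]? = none from List.getElem?_eq_none (by simpa using h)]
    rfl

theorem arrGetD_natCast (a : Array Int) (n : Nat) (d : Int) :
    arrGetD a (n : Int) d = a.toList.getD n d := by
  have hj : (if (n : Int) < 0 then (n : Int) + a.size else (n : Int)) = (n : Int) :=
    if_neg (by omega)
  unfold arrGetD
  rw [hj, if_pos (by omega), Int.toNat_natCast]
  exact arr_getD_toList a n d

theorem arrSetD_natCast (a : Array Int) (n : Nat) (v : Int) :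
    (arrSetD a (n : Int) v).toList = a.toList.set n v := by
  have hj : (if (n : Int) < 0 then (n : Int) + a.size else (n : Int)) = (n : Int) :=
    if_neg (by omega)
  unfold arrSetD
  rw [hj, if_pos (by omega), Int.toNat_natCast]
  exact Array.toList_setIfInBounds ..

theorem arrGetD_neg_one (a : Array Int) (xs : List Int) (x d : Int)
    (h : a.toList = xs ++ [x]) : arrGetD a (-1) d = x := by
  have hsz : a.size = xs.length + 1 := by
    rw [← Array.length_toList, h]; simp
  have hj : (if (-1 : Int) < 0 then (-1 : Int) + a.size else (-1 : Int))
      = (-1 : Int) + a.size := if_pos (by norm_num)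
  unfold arrGetD
  rw [hj, hsz]
  rw [if_pos (by push_cast; omega)]
  rw [show ((-1 : Int) + (xs.length + 1 : Nat)).toNat = xs.length by omega]
  rw [arr_getD_toList, h, List.getD_eq_getElem?_getD, List.getElem?_append_right (by omega)]
  simp

theorem getD_map_range (f : Nat → Int) (n j : Nat) (hj : j < n) :
    ((List.range n).map f).getD j 0 = f j := by
  rw [List.getD_eq_getElem?_getD]
  simp [hj]

theorem getD_map_append (f : Nat → Int) (n j : Nat) (rest : List Int) (hj : j < n) :
    ((List.range n).map f ++ rest).getD j 0 = f j := by
  rw [List.getD_eq_getElem?_getD, List.getElem?_append_left (by simpa using hj)]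
  simp [hj]

theorem set_mid (k n : Nat) (hk : k < n) (v : Int) :
    ((List.range (k + 1)).map dFun ++ List.replicate (n - k) 1).set (k + 1) v
      = (List.range (k + 1)).map dFun ++ v :: List.replicate (n - (k + 1)) (1 : Int) := by
  have h1 : ((List.range (k + 1)).map dFun).length = k + 1 := by simp
  rw [List.set_append, h1]
  simp only [Nat.lt_irrefl, Nat.sub_self]
  rw [show n - k = (n - (k + 1)) + 1 by omega, List.replicate_succ, List.set_cons_zero]
  simp

theorem range_succ_map (k : Nat) (rest : List Int) :
    (List.range (k + 2)).map dFun ++ rest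
      = (List.range (k + 1)).map dFun ++ dFun (k + 1) :: rest := by
  rw [List.range_succ, List.map_append]
  simp

theorem aux_invA (n k : Nat) (hk : k ≤ n) :
    ((PySem.List.pyRange 1 ((k : Int) + 1) 1).foldl processStep
        (((List.range (n + 1)).map (fun _ => (1 : Int))).toArray)).toList
      = (List.range (k + 1)).map dFun ++ List.replicate (n - k) 1 := by
  induction k with
  | zero =>
      rw [PySem.List.pyRange_one_eq_nil (by omega)]
      simp [List.map_const', List.range_one, dFun_zero, List.replicate_succ]
  | succ k ih =>
      have hk' : k ≤ n := by omega
      have hsplit : PySem.List.pyRange 1 ((k : Int) + 1 + 1) 1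
          = PySem.List.pyRange 1 ((k : Int) + 1) 1 ++ [(k : Int) + 1] :=
        PySem.List.pyRange_one_succ_right (a := 1) (b := (k : Int) + 1) (by omega)
      rw [show ((k + 1 : Nat) : Int) + 1 = (k : Int) + 1 + 1 by push_cast; ring, hsplit,
        List.foldl_append]
      set A := (PySem.List.pyRange 1 ((k : Int) + 1) 1).foldl processStep
        (((List.range (n + 1)).map (fun _ => (1 : Int))).toArray) with hA
      have ihL : A.toList = (List.range (k + 1)).map dFun ++ List.replicate (n - k) 1 :=
        ih hk'
      have hget : ∀ j : Nat, j ≤ k → arrGetD A (j : Int) 0 = dFun j := by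
        intro j hj
        rw [arrGetD_natCast, ihL]
        exact getD_map_append dFun (k + 1) j _ (by omega)
      simp only [List.foldl_cons, List.foldl_nil]
      unfold processStep
      rw [show (k : Int) + 1 - 1 = (k : Int) by ring]
      rw [show PySem.Int.mod ((k : Int) + 1) 2 = (((k + 1) % 2 : Nat) : Int) by
        rw [show (k : Int) + 1 = ((k + 1 : Nat) : Int) by push_cast; ring]
        exact PySem.Int.mod_natCast (k + 1) 2]
      rcases Nat.mod_two_eq_zero_or_one (k + 1) with hpar | hpar
      · -- even iteration
        rw [hpar]
        rw [if_neg (by decide)]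
        rw [show PySem.Int.floordiv ((k : Int) + 1) 2 = (((k + 1) / 2 : Nat) : Int) by
          rw [show (k : Int) + 1 = ((k + 1 : Nat) : Int) by push_cast; ring]
          exact PySem.Int.floordiv_natCast (k + 1) 2]
        rw [hget k (le_refl k), hget ((k + 1) / 2) (by omega)]
        rw [show (k : Int) + 1 = ((k + 1 : Nat) : Int) by push_cast; ring,
          arrSetD_natCast, ihL]
        rw [set_mid k n (by omega) _]
        rw [show k + 1 + 1 = k + 2 from rfl, range_succ_map, dFun_even k hpar]
      · -- odd iteration
        rw [hpar]
        rw [if_pos (by decide)]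
        rw [hget k (le_refl k)]
        rw [show (k : Int) + 1 = ((k + 1 : Nat) : Int) by push_cast; ring,
          arrSetD_natCast, ihL]
        rw [set_mid k n (by omega) _]
        rw [show k + 1 + 1 = k + 2 from rfl, range_succ_map, dFun_odd k hpar]

theorem aux_invB (h : Nat) :
    (((PySem.List.pyRange 1 ((h : Int) + 1) 1).foldl processAltStep (#[1], 0)).1.toList
        = (List.range (h + 1)).map eFun)
      ∧ ((PySem.List.pyRange 1 ((h : Int) + 1) 1).foldl processAltStep (#[1], 0)).2
        = sFun h := by
  induction h with
  | zero =>
      rw [PySem.List.pyRange_one_eq_nil (by omega)]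
      constructor
      · simp [List.range_one, eFun, sFun]
      · simp [sFun]
  | succ h ih =>
      obtain ⟨ih1, ih2⟩ := ih
      have hsplit : PySem.List.pyRange 1 ((h : Int) + 1 + 1) 1
          = PySem.List.pyRange 1 ((h : Int) + 1) 1 ++ [(h : Int) + 1] :=
        PySem.List.pyRange_one_succ_right (a := 1) (b := (h : Int) + 1) (by omega)
      rw [show ((h + 1 : Nat) : Int) + 1 = (h : Int) + 1 + 1 by push_cast; ring, hsplit,
        List.foldl_append]
      simp only [List.foldl_cons, List.foldl_nil]
      simp only [processAltStep]
      rw [show PySem.Int.floordiv ((h : Int) + 1) 2 = (((h + 1) / 2 : Nat) : Int) by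
        rw [show (h : Int) + 1 = ((h + 1 : Nat) : Int) by push_cast; ring]
        exact PySem.Int.floordiv_natCast (h + 1) 2]
      rw [arrGetD_natCast, ih1, ih2,
        getD_map_range eFun (h + 1) ((h + 1) / 2) (by omega)]
      have hs : sFun (h + 1) = sFun h + eFun ((h + 1) / 2) := by
        rw [sFun]; rfl
      constructor
      · conv_rhs => rw [show h + 1 + 1 = (h + 1) + 1 from rfl, List.range_succ,
          List.map_append, List.range_succ, List.map_append]
        simp only [List.map_cons, List.map_nil]
        rw [show eFun h = 1 + sFun h from rfl,
          show eFun (h + 1) = 1 + (sFun h + eFun ((h + 1) / 2)) from by rw [eFun, hs]]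
        simp [List.append_assoc]
        rw [ih1, List.range_succ, List.map_append]
        simp [eFun]
      · exact hs.symm

theorem processA_eq (n : Nat) : process (n : Int) = dFun n := by
  have hdp0 : (PySem.List.pyRange 0 ((n : Int) + 1) 1).map (fun _ => (1 : Int))
      = (List.range (n + 1)).map (fun _ => (1 : Int)) := by
    rw [List.map_const', List.map_const', PySem.List.length_pyRange_one,
      List.length_range, show ((n : Int) + 1 - 0).toNat = n + 1 by omega]
  have hfin := aux_invA n n (le_refl n)
  have hfin2 : ((PySem.List.pyRange 1 ((n : Int) + 1) 1).foldl processStep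
      (((List.range (n + 1)).map (fun _ => (1 : Int))).toArray)).toList
      = (List.range n).map dFun ++ [dFun n] := by
    rw [hfin, Nat.sub_self, List.replicate_zero, List.append_nil, List.range_succ,
      List.map_append]
    simp
  unfold process
  show arrGetD ((PySem.List.pyRange 1 ((n : Int) + 1) 1).foldl processStep
      (((PySem.List.pyRange 0 ((n : Int) + 1) 1).map (fun _ => (1 : Int))).toArray)) (-1) 0
    = dFun n
  rw [hdp0]
  exact arrGetD_neg_one _ _ _ _ hfin2

theorem processAlt_eq (n : Nat) : process_alt (n : Int) = eFun (n / 2) := by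
  unfold process_alt
  rw [show PySem.Int.floordiv (n : Int) 2 = ((n / 2 : Nat) : Int) from
    PySem.Int.floordiv_natCast n 2]
  simp only
  rw [arrGetD_natCast, (aux_invB (n / 2)).1]
  exact getD_map_range eFun (n / 2 + 1) (n / 2) (by omega)

-- ===== VERDICT (by name: the statement is the Claim_ definition above) =====
theorem process_spec : Claim_equal_process := by
  unfold Claim_equal_process
  intro num _ hpre
  unfold Spec_process
  obtain ⟨n, rfl⟩ : ∃ n : Nat, num = (n : Int) :=
    ⟨num.toNat, (Int.toNat_of_nonneg hpre).symm⟩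
  rw [processA_eq, processAlt_eq]
  rfl
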